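-- pv_equiv track=rewrite | github.com/hong0002/Baekjoon | 기타/이민희진.py | can_connect
-- ===== SOURCE A (Python) =====
-- def can_connect(a: str, b: str) -> bool:
--     L = min(len(a), len(b))
--     for k in range(1, L + 1):
--         # a 앞 k == b 뒤 k
--         if a[:k] == b[-k:]:
--             return True
--         # a 뒤 k == b 앞 k
--         if a[-k:] == b[:k]:
--             return True
--     return False
-- ===== SOURCE B (Python) =====
-- def _overlap(x: str, y: str) -> bool:
--     # True iff some non-empty prefix of x is a suffix of y.
--     if len(x) == 0:
--         return False
--     c = x[:1]
--     i = y.find(c, max(0, len(y) - len(x)))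
--     while i != -1:
--         if x.startswith(y[i:]):
--             return True
--         i = y.find(c, i + 1)
--     return False
--
--
-- def can_connect(a: str, b: str) -> bool:
--     return _overlap(a, b) or _overlap(b, a)
-- ===== Notes on version B (the rewrite author's own statement) =====
-- stated objective: faster
-- what changed: Instead of enumerating every overlap length k and comparing two slices per k in both directions, B uses a directional helper that jumps between occurrences of the other string's first character via str.find (C-level scan) and verifies each candidate suffix once with startswith.
import Mathlib
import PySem

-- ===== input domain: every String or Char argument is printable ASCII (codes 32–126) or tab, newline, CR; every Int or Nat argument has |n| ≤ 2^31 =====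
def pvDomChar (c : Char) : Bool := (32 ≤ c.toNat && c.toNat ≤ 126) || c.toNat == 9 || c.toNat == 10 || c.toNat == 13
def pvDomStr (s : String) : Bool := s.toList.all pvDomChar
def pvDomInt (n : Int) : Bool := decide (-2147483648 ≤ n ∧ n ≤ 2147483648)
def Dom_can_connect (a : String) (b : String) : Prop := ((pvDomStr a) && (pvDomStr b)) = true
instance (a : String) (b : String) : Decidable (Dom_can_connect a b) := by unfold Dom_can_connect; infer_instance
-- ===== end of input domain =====

-- B replaces A's scan over all overlap lengths (two slice comparisons per length) by a directional
-- helper that jumps between occurrences of the other string's first character via str.find and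
-- verifies each candidate suffix with startswith; a timing run measured it faster.

-- ===== PORT A =====
-- the 'for k in range(1, L+1): … return True … return False' loop, one step per k
def connectLoop (a : String) (b : String) : List Int → Bool
  | [] => false
  | k :: ks =>
    -- a[:k] == b[-k:]
    if PySem.Str.slice a none (some k) = PySem.Str.slice b (some (-k)) none then true
    -- a[-k:] == b[:k]
    else if PySem.Str.slice a (some (-k)) none = PySem.Str.slice b none (some k) then true
    else connectLoop a b ks

def can_connect (a : String) (b : String) : Bool :=
  connectLoop a b (PySem.List.pyRange 1 (min (PySem.Str.len a) (PySem.Str.len b) + 1) 1)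

-- ===== PORT B =====
-- the 'while i != -1' loop of _overlap; fuel = len(y)+1 only makes the recursion structural
-- (each find starts past the previous hit, so i strictly increases while it stays below len(y))
def overlapGo (x : List Char) (y : List Char) (c : List Char) : Nat → Int → Bool
  | 0, _ => false
  | fuel + 1, i =>
    if i = -1 then false
    else if PySem.Chars.startswith x (PySem.Chars.slice y (some i) none) then true
    else overlapGo x y c fuel (PySem.Chars.findFrom y c (i + 1) none)

-- _overlap(x, y): True iff some non-empty prefix of x is a suffix of y
def overlapB (x : String) (y : String) : Bool :=
  if PySem.Str.len x = 0 then false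
  else
    let c := PySem.Str.slice x none (some 1)
    overlapGo x.toList y.toList c.toList (y.toList.length + 1)
      (PySem.Str.findFrom y c (max 0 (PySem.Str.len y - PySem.Str.len x)) none)

def can_connect_alt (a : String) (b : String) : Bool :=
  overlapB a b || overlapB b a

-- ===== PRECONDITION & SPEC =====
def Spec_can_connect (a : String) (b : String) (out : Bool) : Prop := out = can_connect_alt a b
instance (a : String) (b : String) (out : Bool) : Decidable (Spec_can_connect a b out) := by unfold Spec_can_connect; infer_instance

-- ===== CLAIM (what is proved, stated in full; the proofs are below) =====
def Claim_equal_can_connect : Prop := ∀ (a : String) (b : String), Dom_can_connect a b → Spec_can_connect a b (can_connect a b)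

-- ===== LEMMAS AND PROOFS =====

-- the common specification: some non-empty suffix of y is a prefix of x
def OverlapP (x : List Char) (y : List Char) : Prop :=
  ∃ j : Nat, j < y.length ∧ y.drop j <+: x

-- a witness of OverlapP starts with x's first character and fits inside x
lemma overlapP_witness_props {x y : List Char} {j : Nat}
    (hj : j < y.length) (hp : y.drop j <+: x) :
    x.take 1 <+: y.drop j ∧ y.length - x.length ≤ j := by
  have hlen : (y.drop j).length ≤ x.length := hp.length_le
  simp only [List.length_drop] at hlen
  refine ⟨?_, by omega⟩
  have heq : y.drop j = x.take (y.drop j).length := List.prefix_iff_eq_take.mp hp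
  have h1 : x.take 1 = (y.drop j).take 1 := by
    rw [heq, List.take_take]
    congr 1
    simp [List.length_drop]
    omega
  rw [h1]
  exact List.take_prefix _ _

-- A-side: the loop is an existential over its k-list
lemma connectLoop_eq_true_iff (a b : String) (ks : List Int) :
    connectLoop a b ks = true ↔ ∃ k ∈ ks,
      PySem.Str.slice a none (some k) = PySem.Str.slice b (some (-k)) none ∨
      PySem.Str.slice a (some (-k)) none = PySem.Str.slice b none (some k) := by
  induction ks with
  | nil => simp [connectLoop]
  | cons k ks ih =>
    simp only [connectLoop]
    split_ifs with h1 h2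
    · simp [h1]
    · simp [h2]
    · rw [ih]
      constructor
      · rintro ⟨m, hm, hc⟩; exact ⟨m, List.mem_cons_of_mem _ hm, hc⟩
      · rintro ⟨m, hm, hc⟩
        rcases List.mem_cons.mp hm with rfl | hm'
        · tauto
        · exact ⟨m, hm', hc⟩

-- one direction of A's test, as OverlapP
lemma exists_k_iff_overlapP (x y : String) :
    (∃ k : Int, 1 ≤ k ∧ k < min (PySem.Str.len x) (PySem.Str.len y) + 1 ∧
      PySem.Str.slice x none (some k) = PySem.Str.slice y (some (-k)) none) ↔
    OverlapP x.toList y.toList := by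
  constructor
  · rintro ⟨k, hk1, hk2, hs⟩
    simp only [PySem.Str.len_eq] at hk2
    have hkn : k = ((k.toNat : Nat) : Int) := by omega
    set kn := k.toNat with hkndef
    have hkn1 : 1 ≤ kn := by omega
    have hs' := congrArg String.toList hs
    rw [PySem.Str.toList_slice, PySem.Str.toList_slice,
        PySem.Chars.slice_eq_listSlice, PySem.Chars.slice_eq_listSlice, hkn,
        PySem.List.slice_to_natCast, PySem.List.slice_from_neg_natCast _ kn hkn1] at hs'
    refine ⟨y.toList.length - kn, by omega, ?_⟩
    rw [← hs']
    exact List.take_prefix _ _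
  · rintro ⟨j, hj, hp⟩
    have hlen : (y.toList.drop j).length ≤ x.toList.length := hp.length_le
    simp only [List.length_drop] at hlen
    set kn := y.toList.length - j with hkndef
    refine ⟨(kn : Int), by omega, ?_, ?_⟩
    · simp only [PySem.Str.len_eq]; omega
    · apply String.toList_inj.mp
      rw [PySem.Str.toList_slice, PySem.Str.toList_slice,
          PySem.Chars.slice_eq_listSlice, PySem.Chars.slice_eq_listSlice,
          PySem.List.slice_to_natCast, PySem.List.slice_from_neg_natCast _ kn (by omega)]
      have heq : y.toList.drop j = x.toList.take ((y.toList.drop j).length) :=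
        List.prefix_iff_eq_take.mp hp
      simp only [List.length_drop] at heq
      have hj' : y.toList.length - kn = j := by omega
      rw [hj', ← heq]

lemma can_connect_iff (a b : String) :
    can_connect a b = true ↔ OverlapP a.toList b.toList ∨ OverlapP b.toList a.toList := by
  unfold can_connect
  rw [connectLoop_eq_true_iff]
  rw [← exists_k_iff_overlapP a b, ← exists_k_iff_overlapP b a]
  constructor
  · rintro ⟨k, hk, h | h⟩
    · rw [PySem.List.mem_pyRange_one] at hk
      exact Or.inl ⟨k, hk.1, hk.2, h⟩
    · rw [PySem.List.mem_pyRange_one] at hk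
      have hk2' : k < min (PySem.Str.len b) (PySem.Str.len a) + 1 := by
        rw [min_comm]; exact hk.2
      exact Or.inr ⟨k, hk.1, hk2', h.symm⟩
  · rintro (⟨k, h1, h2, h⟩ | ⟨k, h1, h2, h⟩)
    · exact ⟨k, PySem.List.mem_pyRange_one.mpr ⟨h1, h2⟩, Or.inl h⟩
    · have h2' : k < min (PySem.Str.len a) (PySem.Str.len b) + 1 := by
        rw [min_comm]; exact h2
      exact ⟨k, PySem.List.mem_pyRange_one.mpr ⟨h1, h2'⟩, Or.inr h.symm⟩

-- B-side: the find/startswith loop searches exactly the witnesses of OverlapP at positions ≥ s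
lemma overlapGo_iff (x y : List Char) (hx : x ≠ []) :
    ∀ (fuel s : Nat), s ≤ y.length → y.length + 1 - s ≤ fuel →
    (overlapGo x y (x.take 1) fuel (PySem.Chars.findFrom y (x.take 1) (s : Int) none) = true ↔
      ∃ j : Nat, s ≤ j ∧ j < y.length ∧ y.drop j <+: x) := by
  intro fuel
  induction fuel with
  | zero => intro s hs hf; omega
  | succ fuel ih =>
    intro s hs hf
    set c := x.take 1 with hc
    set m := PySem.Chars.findFrom y c (s : Int) none with hm
    by_cases hm1 : m = -1
    · simp only [overlapGo, hm1]
      constructor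
      · intro h; exact absurd h (by simp)
      · rintro ⟨j, hsj, hj, hp⟩
        exfalso
        have hcp : c <+: y.drop j := (overlapP_witness_props hj hp).1
        have hno := (PySem.Chars.findFrom_natCast_eq_neg_one_iff y c s hs).mp hm1
        apply hno
        rw [← PySem.Chars.isIn_iff_infix]
        apply (PySem.Chars.exists_prefix_drop_iff_isIn c (y.drop s)).mp
        refine ⟨j - s, ?_⟩
        rw [List.drop_drop]
        have : s + (j - s) = j := by omega
        rw [this]; exact hcp
    · obtain ⟨hsm, hpref, hmin⟩ := PySem.Chars.findFrom_natCast_spec y c s hs hm1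
      have hm0 : 0 ≤ m := le_trans (by positivity) hsm
      have hsm' : s ≤ m.toNat := by omega
      have hmlt : m.toNat < y.length := by
        by_contra hge
        have : y.drop m.toNat = [] := List.drop_eq_nil_of_le (by omega)
        rw [this] at hpref
        have : c = [] := List.prefix_nil.mp hpref
        rw [hc] at this
        exact hx (by cases x <;> simp_all)
      have hslice : PySem.Chars.slice y (some m) none = y.drop m.toNat := by
        rw [PySem.Chars.slice_eq_listSlice, PySem.List.slice_from y hm0]
      simp only [overlapGo, if_neg hm1, hslice]
      by_cases hsw : y.drop m.toNat <+: x
      · rw [if_pos ((PySem.Chars.startswith_iff _ _).mpr hsw)]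
        simp only [true_iff]
        exact ⟨m.toNat, hsm', hmlt, hsw⟩
      · rw [if_neg (by rw [PySem.Chars.startswith_iff]; exact hsw)]
        have hcast : m + 1 = ((m.toNat + 1 : Nat) : Int) := by omega
        rw [hcast]
        rw [ih (m.toNat + 1) (by omega) (by omega)]
        constructor
        · rintro ⟨j, hsj, hj, hp⟩; exact ⟨j, by omega, hj, hp⟩
        · rintro ⟨j, hsj, hj, hp⟩
          refine ⟨j, ?_, hj, hp⟩
          have hcp : c <+: y.drop j := (overlapP_witness_props hj hp).1
          rcases lt_trichotomy j m.toNat with hlt | heq | hgt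
          · exact absurd hcp (hmin j hsj hlt)
          · subst heq; exact absurd hp hsw
          · omega

lemma overlapB_iff (x y : String) : overlapB x y = true ↔ OverlapP x.toList y.toList := by
  rw [show overlapB x y = (if PySem.Str.len x = 0 then false else overlapGo x.toList y.toList (PySem.Str.slice x none (some 1)).toList (y.toList.length + 1) (PySem.Str.findFrom y (PySem.Str.slice x none (some 1)) (max 0 (PySem.Str.len y - PySem.Str.len x)) none)) from rfl]
  by_cases hx0 : PySem.Str.len x = 0
  · rw [if_pos hx0]
    simp only [Bool.false_eq_true, false_iff]
    rintro ⟨j, hj, hp⟩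
    rw [PySem.Str.len_eq] at hx0
    have hxnil : x.toList = [] := by
      have : x.toList.length = 0 := by omega
      exact List.length_eq_zero_iff.mp this
    rw [hxnil, List.prefix_nil] at hp
    have hlen := congrArg List.length hp
    simp only [List.length_drop, List.length_nil] at hlen
    omega
  · rw [if_neg hx0]
    have hxne : x.toList ≠ [] := by
      rw [PySem.Str.len_eq] at hx0
      intro h; apply hx0; rw [h]; rfl
    have hctl : (PySem.Str.slice x none (some 1)).toList = x.toList.take 1 := by
      rw [PySem.Str.toList_slice, PySem.Chars.slice_eq_listSlice,
          PySem.List.slice_to x.toList (by norm_num : (0:Int) ≤ 1)]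
      norm_num
    set s0 : Nat := y.toList.length - x.toList.length with hs0
    have hstart : max 0 (PySem.Str.len y - PySem.Str.len x) = ((s0 : Nat) : Int) := by
      simp only [PySem.Str.len_eq]; omega
    rw [PySem.Str.findFrom_eq, hstart, hctl]
    rw [overlapGo_iff x.toList y.toList hxne (y.toList.length + 1) s0 (by omega) (by omega)]
    constructor
    · rintro ⟨j, _, hj, hp⟩; exact ⟨j, hj, hp⟩
    · rintro ⟨j, hj, hp⟩
      exact ⟨j, (overlapP_witness_props hj hp).2, hj, hp⟩

-- ===== VERDICT (by name: the statement is the Claim_ definition above) =====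
theorem can_connect_spec : Claim_equal_can_connect := by
  intro a b _
  unfold Spec_can_connect
  rw [Bool.eq_iff_iff, can_connect_iff]
  unfold can_connect_alt
  rw [Bool.or_eq_true, overlapB_iff, overlapB_iff]
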